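-- pv_equiv track=rewrite | github.com/wozlsla/algorithm | ctest/programmers/reviews/140108_review.py | solution
-- ===== SOURCE A (Python) =====
-- def solution(s):
--     x = not_x = cnt = 0
--
--     for i in s:
--         if x == not_x:
--             cnt += 1
--             char = i  # 기준 문자 설정 (update)
--
--         if i == char:
--             x += 1
--         else:
--             not_x += 1
--
--     return cnt
-- ===== SOURCE B (Python) =====
-- def solution(s):
--     cnt = 0
--     while s:
--         ref = s[0]
--         n = len(s)
--         # find the minimal prefix length k at which ref occurs exactly k/2 times
--         # (the end of the first balanced group), by recounting the prefix
--         k = 2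
--         while k <= n and 2 * s.count(ref, 0, k) != k:
--             k += 1
--         cnt += 1
--         s = s[k:]  # empty when the tail never balances (k ran past n)
--     return cnt
-- ===== Notes on version B (the rewrite author's own statement) =====
-- stated objective: alternative
-- what changed: Replaces A's single flat pass carrying (x, not_x, cnt, char) with a start-new-group branch by an outer loop that cuts off one group at a time, locating each group's end by re-counting the reference character over growing prefixes with str.count (no running balance or pair of counters).
import Mathlib
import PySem

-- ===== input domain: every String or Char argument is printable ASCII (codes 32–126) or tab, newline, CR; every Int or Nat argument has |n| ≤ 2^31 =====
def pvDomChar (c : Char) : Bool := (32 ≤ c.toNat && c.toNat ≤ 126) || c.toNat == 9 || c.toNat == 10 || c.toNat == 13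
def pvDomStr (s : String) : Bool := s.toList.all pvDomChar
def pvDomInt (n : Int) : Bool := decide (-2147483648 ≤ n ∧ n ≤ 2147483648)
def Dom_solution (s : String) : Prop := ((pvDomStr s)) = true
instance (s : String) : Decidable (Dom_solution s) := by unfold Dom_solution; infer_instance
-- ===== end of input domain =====

-- B replaces A's single flat pass carrying (x, not_x, cnt, char) by an outer loop that
-- cuts off one group at a time, locating each group's end by recounting the reference
-- character in growing prefixes (no running balance); alternative decomposition, not faster.

-- ===== PORT A =====
-- one iteration of A's for-loop over the state (x, not_x, cnt, char)
def aStep (st : Int × Int × Int × Char) (i : Char) : Int × Int × Int × Char :=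
  let x := st.1; let not_x := st.2.1; let cnt := st.2.2.1; let char := st.2.2.2
  let cnt := if x = not_x then cnt + 1 else cnt
  let char := if x = not_x then i else char
  if i = char then (x + 1, not_x, cnt, char) else (x, not_x + 1, cnt, char)

-- Python's `char` is unassigned before the first iteration but is always assigned there
-- (x == not_x holds initially), so the initial 'a' is never read.
def solution (s : String) : Int := (s.toList.foldl aStep (0, 0, 0, 'a')).2.2.1

-- ===== PORT B =====
-- B's inner while loop: the minimal prefix length k (starting from 2) at which ref
-- occurs exactly k/2 times in l.take k; returns l.length + 1-or-more if none exists
def altFindK (l : List Char) (ref : Char) (k : Nat) : Nat :=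
  if k ≤ l.length then
    if 2 * ((l.take k).count ref) = k then k
    else altFindK l ref (k + 1)
  else k
termination_by l.length + 1 - k

-- needed by altSolve's decreasing_by: the found k never shrinks below its start value
theorem altFindK_ge (l : List Char) (ref : Char) : ∀ k, k ≤ altFindK l ref k := by
  intro k
  induction k using altFindK.induct (l := l) (ref := ref) with
  | case1 k h1 h2 => rw [altFindK, if_pos h1, if_pos h2]
  | case2 k h1 h2 ih => rw [altFindK, if_pos h1, if_neg h2]; omega
  | case3 k h1 => rw [altFindK, if_neg h1]

-- B's outer while loop: cut off one group per iteration, counting it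
def altSolve : List Char → Int → Int
  | [], cnt => cnt
  | c :: t, cnt => altSolve ((c :: t).drop (altFindK (c :: t) c 2)) (cnt + 1)
termination_by l => l.length
decreasing_by
  have h2 := altFindK_ge (c :: t) c 2
  simp only [List.length_drop, List.length_cons]
  omega

def solution_alt (s : String) : Int := altSolve s.toList 0

-- ===== PRECONDITION & SPEC =====
def Spec_solution (s : String) (out : Int) : Prop := out = solution_alt s
instance (s : String) (out : Int) : Decidable (Spec_solution s out) := by unfold Spec_solution; infer_instance

-- ===== CLAIM (what is proved, stated in full; the proofs are below) =====
def Claim_equal_solution : Prop := ∀ (s : String), Dom_solution s → Spec_solution s (solution s)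

-- ===== LEMMAS AND PROOFS =====

-- A's cnt, phrased recursively over the balance bal = x - not_x
def aCnt (l : List Char) (bal cnt : Int) (ref : Char) : Int :=
  match l with
  | [] => cnt
  | c :: t =>
    if bal = 0 then aCnt t 1 (cnt + 1) c
    else aCnt t (bal + (if c = ref then 1 else -1)) cnt ref

-- proof-only intermediate form of the inner scan: advance the balance until it hits 0
def altConsume (ref : Char) (bal : Int) : List Char → List Char
  | [] => []
  | c :: t =>
    let bal' := bal + (if c = ref then 1 else -1)
    if bal' = 0 then t else altConsume ref bal' t

theorem altConsume_length_le (ref : Char) (bal : Int) :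
    ∀ l : List Char, (altConsume ref bal l).length ≤ l.length := by
  intro l
  induction l generalizing bal with
  | nil => simp [altConsume]
  | cons c t ih =>
    simp only [altConsume]
    by_cases hz : bal + (if c = ref then 1 else -1) = 0
    · simp [hz]
    · simp only [if_neg hz, List.length_cons]
      exact Nat.le_succ_of_le (ih _)

-- proof-only intermediate form of the outer loop, driven by altConsume
def altGo : List Char → Int
  | [] => 0
  | c :: t => 1 + altGo (altConsume c 1 t)
termination_by l => l.length
decreasing_by
  exact Nat.lt_succ_of_le (altConsume_length_le c 1 t)

-- A's fold only depends on x, not_x through the balance x - not_x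
theorem foldl_eq_aCnt (l : List Char) :
    ∀ (x nx cnt : Int) (ref : Char),
    (l.foldl aStep (x, nx, cnt, ref)).2.2.1 = aCnt l (x - nx) cnt ref := by
  induction l with
  | nil => intro x nx cnt ref; simp [aCnt]
  | cons c t ih =>
    intro x nx cnt ref
    rw [List.foldl_cons]
    by_cases hx : x = nx
    · subst hx
      have hs : aStep (x, x, cnt, ref) c = (x + 1, x, cnt + 1, c) := by simp [aStep]
      rw [hs, ih, aCnt, if_pos (sub_self x), show x + 1 - x = (1:Int) from by ring]
    · have hbal : x - nx ≠ 0 := sub_ne_zero.mpr hx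
      rw [aCnt, if_neg hbal]
      by_cases hc : c = ref
      · have hs : aStep (x, nx, cnt, ref) c = (x + 1, nx, cnt, ref) := by simp [aStep, hx, hc]
        rw [hs, ih, if_pos hc, show x + 1 - nx = x - nx + 1 from by ring]
      · have hs : aStep (x, nx, cnt, ref) c = (x, nx + 1, cnt, ref) := by simp [aStep, hx, hc]
        rw [hs, ih, if_neg hc, show x - (nx + 1) = x - nx + (-1) from by ring]

-- while the balance is nonzero, A's recursion tracks the balance scan exactly
theorem aCnt_consume (ref : Char) :
    ∀ (l : List Char) (bal cnt : Int), bal ≠ 0 →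
    aCnt l bal cnt ref = aCnt (altConsume ref bal l) 0 cnt ref := by
  intro l
  induction l with
  | nil => intro bal cnt h; simp [aCnt, altConsume]
  | cons c t ih =>
    intro bal cnt h
    rw [aCnt, if_neg h]
    simp only [altConsume]
    by_cases hz : bal + (if c = ref then 1 else -1) = 0
    · rw [hz, if_pos rfl]
    · rw [if_neg hz, ih _ _ hz]

-- from a balanced state, A's cnt equals cnt plus the group count of the remaining suffix
theorem aCnt_zero_eq_altGo (l : List Char) :
    ∀ (cnt : Int) (ref : Char), aCnt l 0 cnt ref = cnt + altGo l := by
  induction l using altGo.induct with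
  | case1 => intro cnt ref; simp [aCnt, altGo]
  | case2 c t ih =>
    intro cnt ref
    rw [aCnt, if_pos rfl, aCnt_consume c t 1 (cnt + 1) (by norm_num), ih, altGo]
    ring

-- BRIDGE: the balance scan lands exactly where B's prefix-recount search points.
-- Invariant: k chars of l are already consumed and bal = 2·count(ref, l.take k) - k ≠ 0.
theorem consume_eq_drop_findK :
    ∀ (t l : List Char) (ref : Char) (k : Nat) (bal : Int),
    l.drop k = t → bal = 2 * (((l.take k).count ref : Int)) - (k : Int) → bal ≠ 0 →
    altConsume ref bal t = l.drop (altFindK l ref (k + 1)) := by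
  intro t
  induction t with
  | nil =>
    intro l ref k bal hdrop _ _
    have hlen : l.length ≤ k := List.drop_eq_nil_iff.mp hdrop
    rw [altConsume, altFindK, if_neg (by omega)]
    exact (List.drop_eq_nil_iff.mpr (by omega)).symm
  | cons c t' ih =>
    intro l ref k bal hdrop hbal hne
    have hk : k < l.length := by
      by_contra h
      rw [List.drop_eq_nil_iff.mpr (by omega)] at hdrop
      simp at hdrop
    have hget : l[k]? = some c := by
      rw [← List.head?_drop, hdrop]; rfl
    have htake : l.take (k + 1) = l.take k ++ [c] := by
      rw [List.take_add_one, hget]; rfl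
    have hdrop' : l.drop (k + 1) = t' := by
      rw [← List.tail_drop, hdrop]; rfl
    have hcount : ((l.take (k + 1)).count ref : Int)
        = ((l.take k).count ref : Int) + (if c = ref then 1 else 0) := by
      rw [htake, List.count_append]
      by_cases hc : c = ref <;> simp [hc]
    have hbal' : bal + (if c = ref then 1 else -1)
        = 2 * (((l.take (k + 1)).count ref : Int)) - ((k : Int) + 1) := by
      rw [hcount]; by_cases hc : c = ref <;> simp [hc, hbal] <;> ring
    simp only [altConsume]
    rw [altFindK, if_pos (show k + 1 ≤ l.length by omega)]
    by_cases hz : bal + (if c = ref then 1 else -1) = 0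
    · have hcond : 2 * ((l.take (k + 1)).count ref) = k + 1 := by
        have : (2 * (((l.take (k + 1)).count ref : Int)) - ((k : Int) + 1)) = 0 := by
          rw [← hbal']; exact hz
        omega
      rw [if_pos hz, if_pos hcond, hdrop']
    · have hcond : ¬ (2 * ((l.take (k + 1)).count ref) = k + 1) := by
        intro h
        apply hz
        rw [hbal']
        omega
      rw [if_neg hz, if_neg hcond]
      exact ih l ref (k + 1) _ hdrop' (by rw [hbal']; push_cast; ring) hz

-- B's loop equals the intermediate altGo form
theorem altSolve_eq_altGo (l : List Char) : ∀ cnt : Int, altSolve l cnt = cnt + altGo l := by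
  induction l using altGo.induct with
  | case1 => intro cnt; simp [altSolve, altGo]
  | case2 c t ih =>
    intro cnt
    have hb : altConsume c 1 t = (c :: t).drop (altFindK (c :: t) c 2) := by
      have := consume_eq_drop_findK t (c :: t) c 1 1 (by simp) (by simp) (by norm_num)
      simpa using this
    rw [altSolve, ← hb, ih, altGo]
    ring

-- ===== VERDICT (by name: the statement is the Claim_ definition above) =====
theorem solution_spec : Claim_equal_solution := by
  intro s _
  unfold Spec_solution solution solution_alt
  rw [foldl_eq_aCnt, altSolve_eq_altGo]
  simpa using aCnt_zero_eq_altGo s.toList 0 'a'
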